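-- pv_equiv track=rewrite | github.com/dvdmrn/ame-scraping | ParseTeams.py | sortFeedbackScores
-- ===== SOURCE A (Python) =====
-- def sortFeedbackScores(scores):
-- 	output = []
-- 	for i in range(0,max(len(scores["SCNR"]),len(scores["CLSN"]))):
-- 		try:
-- 			output.append({"SCNR":scores["SCNR"][i],"CLSN":scores["CLSN"][i]})
-- 		except:
-- 			if i > (len(scores["SCNR"])-1):
-- 				output.append({"SCNR":"","CLSN":scores["CLSN"][i]})
-- 			elif i > (len(scores["CLSN"])-1):
-- 				output.append({"SCNR":scores["SCNR"][i],"CLSN":""})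
--
-- 	return output
-- ===== SOURCE B (Python) =====
-- def sortFeedbackScores(scores):
--     xs = scores["SCNR"]
--     ys = scores["CLSN"]
--     xs2 = xs + [""] * (len(ys) - len(xs))
--     ys2 = ys + [""] * (len(xs) - len(ys))
--     return [{"SCNR": a, "CLSN": b} for a, b in zip(xs2, ys2)]
-- ===== Notes on version B (the rewrite author's own statement) =====
-- stated objective: simpler
-- what changed: Replaces A's index loop over range(max(len,len)) with try/except-driven padding by padding the shorter list with "" once and zipping, with no indexing or exception handling.
import Mathlib
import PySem

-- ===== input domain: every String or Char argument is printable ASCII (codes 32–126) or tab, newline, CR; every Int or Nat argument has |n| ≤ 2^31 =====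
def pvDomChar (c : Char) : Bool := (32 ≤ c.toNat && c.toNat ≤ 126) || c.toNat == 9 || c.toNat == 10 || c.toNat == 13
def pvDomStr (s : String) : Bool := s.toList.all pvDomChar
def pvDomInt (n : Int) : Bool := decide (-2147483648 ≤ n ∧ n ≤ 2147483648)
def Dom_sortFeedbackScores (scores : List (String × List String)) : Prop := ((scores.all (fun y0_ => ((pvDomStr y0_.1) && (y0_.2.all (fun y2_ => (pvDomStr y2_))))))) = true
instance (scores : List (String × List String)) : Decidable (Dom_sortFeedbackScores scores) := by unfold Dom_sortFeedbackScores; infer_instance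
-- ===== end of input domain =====

-- B replaces A's max-length index loop with its try/except padding by pad-then-zip (simpler decomposition, same cost).

-- ===== PORT A =====
-- A: for i in range(0, max(len, len)): try both indexings; in the except branch pad the exhausted side with "".
def sortFeedbackScores (scores : List (String × List String)) : List (List (String × String)) :=
  let sc := (scores.lookup "SCNR").getD []
  let cl := (scores.lookup "CLSN").getD []
  (PySem.List.pyRange 0 (max (sc.length : Int) (cl.length : Int)) 1).foldl
    (fun output i =>
      match PySem.List.pyGet? sc i, PySem.List.pyGet? cl i with
      | some a, some b => output ++ [[("SCNR", a), ("CLSN", b)]]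
      | _, _ =>  -- except: an IndexError occurred
        if i > (sc.length : Int) - 1 then
          -- cl[i] is in range for every i this branch reaches; the getD "" default is never used
          output ++ [[("SCNR", ""), ("CLSN", (PySem.List.pyGet? cl i).getD "")]]
        else if i > (cl.length : Int) - 1 then
          output ++ [[("SCNR", (PySem.List.pyGet? sc i).getD ""), ("CLSN", "")]]
        else output) []

-- ===== PORT B =====
-- B: pad the shorter list with "" to equal length, then zip and build the dicts.
def sortFeedbackScores_alt (scores : List (String × List String)) : List (List (String × String)) :=
  let xs := (scores.lookup "SCNR").getD []
  let ys := (scores.lookup "CLSN").getD []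
  let xs2 := xs ++ List.replicate (ys.length - xs.length) ""
  let ys2 := ys ++ List.replicate (xs.length - ys.length) ""
  (xs2.zip ys2).map (fun p => [("SCNR", p.1), ("CLSN", p.2)])

-- ===== PRECONDITION & SPEC =====
-- Pre_ excludes inputs missing the key "SCNR" or "CLSN", on which the Python A raises KeyError.
def Pre_sortFeedbackScores (scores : List (String × List String)) : Prop :=
  "SCNR" ∈ scores.map Prod.fst ∧ "CLSN" ∈ scores.map Prod.fst
instance (scores : List (String × List String)) : Decidable (Pre_sortFeedbackScores scores) := by unfold Pre_sortFeedbackScores; infer_instance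
def pvWitness_sortFeedbackScores : (List (String × List String)) := [("SCNR", ["1", "2"]), ("CLSN", ["3"])]

def Spec_sortFeedbackScores (scores : List (String × List String)) (out : List (List (String × String))) : Prop := out = sortFeedbackScores_alt scores
instance (scores : List (String × List String)) (out : List (List (String × String))) : Decidable (Spec_sortFeedbackScores scores out) := by unfold Spec_sortFeedbackScores; infer_instance

-- ===== CLAIM (what is proved, stated in full; the proofs are below) =====
def Claim_equal_sortFeedbackScores : Prop := ∀ (scores : List (String × List String)), Dom_sortFeedbackScores scores → Pre_sortFeedbackScores scores → Spec_sortFeedbackScores scores (sortFeedbackScores scores)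

-- ===== LEMMAS AND PROOFS =====
def pvH (sc cl : List String) (i : Int) : List (List (String × String)) :=
  match PySem.List.pyGet? sc i, PySem.List.pyGet? cl i with
  | some a, some b => [[("SCNR", a), ("CLSN", b)]]
  | _, _ =>
    if i > (sc.length : Int) - 1 then
      [[("SCNR", ""), ("CLSN", (PySem.List.pyGet? cl i).getD "")]]
    else if i > (cl.length : Int) - 1 then
      [[("SCNR", (PySem.List.pyGet? sc i).getD ""), ("CLSN", "")]]
    else []

def pvTl {α : Type} : List α → List α
  | [] => []
  | _ :: xs => xs

lemma pvH_shift (sc cl : List String) (k : Nat) :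
    pvH sc cl ((k : Int) + 1) = pvH (pvTl sc) (pvTl cl) (k : Int) := by
  cases sc with
  | nil => cases cl with
    | nil =>
        simp [pvH, pvTl, PySem.List.pyGet?]
        omega
    | cons b cl' =>
        simp only [pvH, pvTl, PySem.List.pyGet?_cons_succ, PySem.List.pyGet?_natCast]
        simp [PySem.List.pyGet?]
        omega
  | cons a sc' => cases cl with
    | nil =>
        simp only [pvH, pvTl, PySem.List.pyGet?_cons_succ, PySem.List.pyGet?_natCast]
        simp [PySem.List.pyGet?]
        constructor
    | cons b cl' =>
        simp only [pvH, pvTl, PySem.List.pyGet?_cons_succ, PySem.List.pyGet?_natCast]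
        simp

lemma pvGet_nil_zero : PySem.List.pyGet? ([] : List String) 0 = none := by
  simp [PySem.List.pyGet?]

lemma pvH_zero (sc cl : List String) :
    pvH sc cl 0 = (match sc, cl with
      | a :: _, b :: _ => [[("SCNR", a), ("CLSN", b)]]
      | a :: _, [] => [[("SCNR", a), ("CLSN", "")]]
      | [], b :: _ => [[("SCNR", ""), ("CLSN", b)]]
      | [], [] => [[("SCNR", ""), ("CLSN", "")]]) := by
  cases sc <;> cases cl <;> simp [pvH, pvGet_nil_zero]

def pvF : String × String → List (String × String) := fun p => [("SCNR", p.1), ("CLSN", p.2)]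

def pvPadZip (sc cl : List String) : List (List (String × String)) :=
  ((sc ++ List.replicate (cl.length - sc.length) "").zip
    (cl ++ List.replicate (sc.length - cl.length) "")).map pvF

lemma pv_main : ∀ (sc cl : List String) (acc : List (List (String × String))),
    (List.range (max sc.length cl.length)).foldl (fun out (k : Nat) => out ++ pvH sc cl (k : Int)) acc
      = acc ++ pvPadZip sc cl := by
  intro sc
  induction sc with
  | nil =>
    intro cl
    induction cl with
    | nil => intro acc; simp [pvPadZip]
    | cons b cl' ih =>
      intro acc
      have hm : max ([] : List String).length (b :: cl').length = cl'.length + 1 := by simp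
      rw [hm, List.range_succ_eq_map, List.foldl_cons, List.foldl_map]
      have hstep : (fun (out : List (List (String × String))) (k : Nat) =>
          out ++ pvH [] (b :: cl') ((k.succ : Nat) : Int)) =
          (fun out (k : Nat) => out ++ pvH (pvTl ([] : List String)) (pvTl (b :: cl')) (k : Int)) := by
        funext out k
        rw [show ((k.succ : Nat) : Int) = (k : Int) + 1 by push_cast; ring, pvH_shift]
      rw [hstep]
      have hm2 : cl'.length = max ([] : List String).length cl'.length := by simp
      rw [show pvTl ([] : List String) = [] from rfl, show pvTl (b :: cl') = cl' from rfl, hm2, ih]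
      simp only [Nat.cast_zero]
      rw [pvH_zero]
      simp [pvPadZip, pvF, List.replicate_succ]
  | cons a sc' ihsc =>
    intro cl acc
    have hmax : max (a :: sc').length cl.length = (max sc'.length (pvTl cl).length) + 1 := by
      cases cl <;> simp [pvTl]
    rw [hmax, List.range_succ_eq_map, List.foldl_cons, List.foldl_map]
    have hstep : (fun (out : List (List (String × String))) (k : Nat) =>
        out ++ pvH (a :: sc') cl ((k.succ : Nat) : Int)) =
        (fun out (k : Nat) => out ++ pvH (pvTl (a :: sc')) (pvTl cl) (k : Int)) := by
      funext out k
      rw [show ((k.succ : Nat) : Int) = (k : Int) + 1 by push_cast; ring, pvH_shift]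
    rw [hstep, show pvTl (a :: sc') = sc' from rfl, ihsc (pvTl cl)]
    simp only [Nat.cast_zero]
    rw [pvH_zero]
    cases cl with
    | nil => simp [pvPadZip, pvTl, pvF, List.replicate_succ]
    | cons b cl' => simp [pvPadZip, pvTl, pvF]

lemma pvRangeCast (n : Nat) : PySem.List.pyRange 0 (n : Int) 1 = List.map (fun (k : Nat) => Int.ofNat k) (List.range n) := by
  rw [PySem.List.pyRange_zero_natCast]
  induction n with
  | zero => simp
  | succ m ih => rw [List.range_succ]; simp_all

lemma pv_body (sc cl : List String) (out : List (List (String × String))) (i : Int) :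
    (match PySem.List.pyGet? sc i, PySem.List.pyGet? cl i with
      | some a, some b => out ++ [[("SCNR", a), ("CLSN", b)]]
      | _, _ =>
        if i > (sc.length : Int) - 1 then
          out ++ [[("SCNR", ""), ("CLSN", (PySem.List.pyGet? cl i).getD "")]]
        else if i > (cl.length : Int) - 1 then
          out ++ [[("SCNR", (PySem.List.pyGet? sc i).getD ""), ("CLSN", "")]]
        else out) = out ++ pvH sc cl i := by
  unfold pvH
  cases h1 : PySem.List.pyGet? sc i <;> cases h2 : PySem.List.pyGet? cl i <;> simp <;> split_ifs <;> simp

lemma pv_bridge (sc cl : List String) :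
    (PySem.List.pyRange 0 (max (sc.length : Int) (cl.length : Int)) 1).foldl
      (fun output i =>
        match PySem.List.pyGet? sc i, PySem.List.pyGet? cl i with
        | some a, some b => output ++ [[("SCNR", a), ("CLSN", b)]]
        | _, _ =>
          if i > (sc.length : Int) - 1 then
            output ++ [[("SCNR", ""), ("CLSN", (PySem.List.pyGet? cl i).getD "")]]
          else if i > (cl.length : Int) - 1 then
            output ++ [[("SCNR", (PySem.List.pyGet? sc i).getD ""), ("CLSN", "")]]
          else output) []
    = ((sc ++ List.replicate (cl.length - sc.length) "").zip
        (cl ++ List.replicate (sc.length - cl.length) "")).map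
        (fun p => [("SCNR", p.1), ("CLSN", p.2)]) := by
  rw [show max (sc.length : Int) (cl.length : Int) = ((max sc.length cl.length : Nat) : Int) by push_cast; rfl,
      pvRangeCast, List.foldl_map]
  simp only [pv_body]
  simp only [Int.ofNat_eq_natCast]
  rw [pv_main sc cl []]
  simp [pvPadZip, pvF]

-- ===== VERDICT (by name: the statement is the Claim_ definition above) =====
theorem sortFeedbackScores_spec : Claim_equal_sortFeedbackScores := by
  intro scores _ _
  show sortFeedbackScores scores = sortFeedbackScores_alt scores
  exact pv_bridge ((scores.lookup "SCNR").getD []) ((scores.lookup "CLSN").getD [])
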